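-- pv_equiv track=rewrite | github.com/DMirandex/PL2025 | tpc1/somadorONoFF.py | processar_texto
-- ===== SOURCE A (Python) =====
-- def processar_texto(texto):
--     soma = 0
--     numero_atual = 0
--     ativado = True
--     resultado = []
--
--     i = 0
--     while i < len(texto):
--         char = texto[i]
--
--         if char.isdigit():
--             numero_atual = numero_atual * 10 + int(char)
--         else:
--             soma += numero_atual if ativado else 0
--             numero_atual = 0
--
--             if char == '=':
--                 resultado.append(str(soma))
--             elif texto[i:i+2].lower() == "on":
--                 ativado = True
--                 i += 1 #ignora o proximo caracter
--             elif texto[i:i+3].lower() == "off":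
--                 ativado = False
--                 i += 2  #ignora o proximos 2 caracteres
--
--         i += 1
--
--     soma += numero_atual if ativado else 0  # Adiciona o último número acumulado
--     resultado.append(str(soma))
--
--     return " ".join(resultado)
-- ===== SOURCE B (Python) =====
-- import re
--
-- _TOKEN = re.compile(r'\d+|=|[oO][nN]|[oO][fF][fF]')
--
-- def processar_texto(texto):
--     soma = 0
--     ativado = True
--     resultado = []
--     for m in _TOKEN.finditer(texto):
--         tok = m.group()
--         if tok[0].isdigit():
--             if ativado:
--                 soma += int(tok)
--         elif tok == '=':
--             resultado.append(str(soma))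
--         elif len(tok) == 2:
--             ativado = True
--         else:
--             ativado = False
--     resultado.append(str(soma))
--     return " ".join(resultado)
-- ===== Notes on version B (the rewrite author's own statement) =====
-- stated objective: faster
-- what changed: Replaced A's char-by-char while-loop with manual digit accumulation, index skips and slice comparisons by a regex tokenizer (re.finditer on \d+|=|[oO][nN]|[oO][fF][fF]) followed by a single fold over the token stream.
import Mathlib
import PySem

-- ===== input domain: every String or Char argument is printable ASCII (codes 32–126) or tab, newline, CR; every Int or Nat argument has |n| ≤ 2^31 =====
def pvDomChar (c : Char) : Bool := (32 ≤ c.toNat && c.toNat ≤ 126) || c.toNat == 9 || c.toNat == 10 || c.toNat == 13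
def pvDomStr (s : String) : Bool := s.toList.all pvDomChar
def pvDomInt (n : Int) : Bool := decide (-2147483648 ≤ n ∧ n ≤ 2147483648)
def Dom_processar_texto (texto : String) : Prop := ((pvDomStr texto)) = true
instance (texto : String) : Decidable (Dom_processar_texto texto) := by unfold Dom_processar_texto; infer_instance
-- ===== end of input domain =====

-- B replaces A's char-by-char while-loop (with manual digit accumulation and index skips)
-- by a two-phase regex tokenizer (\d+|=|on|off, case-insensitive) followed by a single fold
-- over the token stream; a timing run measured B faster (constant factor: C-level regex
-- scanning instead of per-character Python bytecode).

-- ===== PORT A =====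
-- A's while-loop over the index i is ported as structural recursion over the suffix of the
-- text starting at i; texto[i:i+k] is the take k of that suffix. int(char) for a digit char
-- is exactly (c.toNat : Int) - 48; char.isdigit() is PySem.Chars.isdigit; str(n) is
-- PySem.Int.toStr; " ".join is PySem.Str.join.
def pvA_loop (cs : List Char) (soma numero_atual : Int) (ativado : Bool)
    (resultado : List String) : List String :=
  match cs with
  | [] =>
      -- loop exit: soma += numero_atual if ativado; resultado.append(str(soma))
      resultado ++ [PySem.Int.toStr (soma + (if ativado then numero_atual else 0))]
  | c :: rest =>
      if PySem.Chars.isdigit c then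
        pvA_loop rest soma (numero_atual * 10 + ((c.toNat : Int) - 48)) ativado resultado
      else
        let soma2 := soma + (if ativado then numero_atual else 0)
        if c = '=' then
          pvA_loop rest soma2 0 ativado (resultado ++ [PySem.Int.toStr soma2])
        else if PySem.Chars.lower ((c :: rest).take 2) = ['o', 'n'] then
          pvA_loop (rest.drop 1) soma2 0 true resultado   -- i += 1 then i += 1
        else if PySem.Chars.lower ((c :: rest).take 3) = ['o', 'f', 'f'] then
          pvA_loop (rest.drop 2) soma2 0 false resultado  -- i += 2 then i += 1
        else
          pvA_loop rest soma2 0 ativado resultado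
  termination_by cs.length
  decreasing_by all_goals (simp [List.length_drop]; try omega)

def processar_texto (texto : String) : String :=
  PySem.Str.join " " (pvA_loop texto.toList 0 0 true [])

-- ===== PORT B =====
-- B's tokens: a maximal digit run (as its int value), '=', 'on', 'off'.
inductive PvTok where
  | num : Int → PvTok
  | eq : PvTok
  | on : PvTok
  | off : PvTok
deriving DecidableEq, Repr

-- regex char classes [oO][nN] and [oO][fF][fF] at the current position
def pvIsOn (c : Char) (rest : List Char) : Bool :=
  (c == 'o' || c == 'O') &&
    (match rest with
     | d :: _ => d == 'n' || d == 'N'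
     | [] => false)

def pvIsOff (c : Char) (rest : List Char) : Bool :=
  (c == 'o' || c == 'O') &&
    (match rest with
     | d :: e :: _ => (d == 'f' || d == 'F') && (e == 'f' || e == 'F')
     | _ => false)

-- hand port of re.finditer(r'\d+|=|[oO][nN]|[oO][fF][fF]', texto): at each position try the
-- alternatives in order (\d+ greedy, so a maximal digit run, whose int value is the usual
-- base-10 fold — exact for a nonempty all-digit token), else advance one character.
def pvTokens (cs : List Char) : List PvTok :=
  match cs with
  | [] => []
  | c :: rest =>
      if h : PySem.Chars.isdigit c then
        PvTok.num (((c :: rest).takeWhile PySem.Chars.isdigit).foldl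
            (fun a d => a * 10 + ((d.toNat : Int) - 48)) 0)
          :: pvTokens ((c :: rest).dropWhile PySem.Chars.isdigit)
      else if c = '=' then PvTok.eq :: pvTokens rest
      else if pvIsOn c rest then PvTok.on :: pvTokens (rest.drop 1)
      else if pvIsOff c rest then PvTok.off :: pvTokens (rest.drop 2)
      else pvTokens rest
  termination_by cs.length
  decreasing_by
    · rw [List.dropWhile_cons_of_pos h]
      have := List.length_dropWhile_le PySem.Chars.isdigit rest
      simp; try omega
    all_goals (simp [List.length_drop]; try omega)

-- the fold over the token stream (B's for-loop body plus the final append)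
def pvB_run (toks : List PvTok) (soma : Int) (ativado : Bool)
    (resultado : List String) : List String :=
  match toks with
  | [] => resultado ++ [PySem.Int.toStr soma]
  | PvTok.num n :: t => pvB_run t (if ativado then soma + n else soma) ativado resultado
  | PvTok.eq :: t => pvB_run t soma ativado (resultado ++ [PySem.Int.toStr soma])
  | PvTok.on :: t => pvB_run t soma true resultado
  | PvTok.off :: t => pvB_run t soma false resultado

def processar_texto_alt (texto : String) : String :=
  PySem.Str.join " " (pvB_run (pvTokens texto.toList) 0 true [])

-- ===== PRECONDITION & SPEC =====
def Spec_processar_texto (texto : String) (out : String) : Prop := out = processar_texto_alt texto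
instance (texto : String) (out : String) : Decidable (Spec_processar_texto texto out) := by unfold Spec_processar_texto; infer_instance

-- ===== CLAIM (what is proved, stated in full; the proofs are below) =====
def Claim_equal_processar_texto : Prop := ∀ (texto : String), Dom_processar_texto texto → Spec_processar_texto texto (processar_texto texto)

-- ===== LEMMAS AND PROOFS =====

theorem pvChar_eq_of_toNat {c d : Char} (h : c.toNat = d.toNat) : c = d :=
  Char.ext (UInt32.toNat_inj.mp h)

theorem pvToNat_ofNat (n : Nat) (h : n < 55296) : (Char.ofNat n).toNat = n := by
  unfold Char.ofNat
  rw [dif_pos (by left; omega)]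
  unfold Char.ofNatAux Char.toNat
  simp

theorem pvLe_iff (c d : Char) : (c ≤ d) ↔ c.toNat ≤ d.toNat := by
  rw [Char.le_def, UInt32.le_iff_toNat_le]
  exact Iff.rfl

-- lowerChar c equals a lowercase letter l iff c is l itself or its uppercase partner U
theorem pvLowerChar_eq (c U l : Char) (hUl : U.toNat + 32 = l.toNat)
    (hU1 : 65 ≤ U.toNat) (hU2 : U.toNat ≤ 90) :
    (PySem.Chars.lowerChar c = l) ↔ (c = l ∨ c = U) := by
  constructor
  · intro h
    unfold PySem.Chars.lowerChar PySem.Chars.isupper at h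
    split_ifs at h with hu
    · right
      simp only [Bool.and_eq_true, decide_eq_true_eq] at hu
      have h1 : 65 ≤ c.toNat := by
        have := hu.1; rw [pvLe_iff] at this
        have hA : ('A' : Char).toNat = 65 := by decide
        omega
      have h2 : c.toNat ≤ 90 := by
        have := hu.2; rw [pvLe_iff] at this
        have hZ : ('Z' : Char).toNat = 90 := by decide
        omega
      have hv : c.toNat + 32 = l.toNat := by
        have h3 := congrArg Char.toNat h
        rwa [pvToNat_ofNat _ (by omega)] at h3
      exact pvChar_eq_of_toNat (by omega)
    · left; exact h
  · rintro (rfl | rfl)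
    · unfold PySem.Chars.lowerChar PySem.Chars.isupper
      have h2 : ¬ (c ≤ 'Z') := by
        rw [pvLe_iff]
        have hZ : ('Z' : Char).toNat = 90 := by decide
        omega
      simp [h2]
    · unfold PySem.Chars.lowerChar PySem.Chars.isupper
      have hA : 'A' ≤ c := by
        rw [pvLe_iff]
        have : ('A' : Char).toNat = 65 := by decide
        omega
      have hZ : c ≤ 'Z' := by
        rw [pvLe_iff]
        have : ('Z' : Char).toNat = 90 := by decide
        omega
      rw [if_pos (by simp [hA, hZ])]
      exact pvChar_eq_of_toNat (by
        rw [pvToNat_ofNat _ (by omega)]; omega)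

theorem pvLower_on_iff (c : Char) (rest : List Char) :
    (PySem.Chars.lower ((c :: rest).take 2) = ['o', 'n']) ↔ pvIsOn c rest = true := by
  cases rest with
  | nil => simp [PySem.Chars.lower, pvIsOn]
  | cons d rest' =>
    have ht : (c :: d :: rest').take 2 = [c, d] := rfl
    rw [ht]
    simp only [PySem.Chars.lower, List.map, pvIsOn, List.cons.injEq, and_true,
      Bool.and_eq_true, Bool.or_eq_true, beq_iff_eq]
    rw [pvLowerChar_eq c 'O' 'o' (by decide) (by decide) (by decide),
      pvLowerChar_eq d 'N' 'n' (by decide) (by decide) (by decide)]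

theorem pvLower_off_iff (c : Char) (rest : List Char) :
    (PySem.Chars.lower ((c :: rest).take 3) = ['o', 'f', 'f']) ↔ pvIsOff c rest = true := by
  cases rest with
  | nil => simp [PySem.Chars.lower, pvIsOff]
  | cons d rest' =>
    cases rest' with
    | nil => simp [PySem.Chars.lower, pvIsOff]
    | cons e rest'' =>
      have ht : (c :: d :: e :: rest'').take 3 = [c, d, e] := rfl
      rw [ht]
      simp only [PySem.Chars.lower, List.map, pvIsOff, List.cons.injEq, and_true,
        Bool.and_eq_true, Bool.or_eq_true, beq_iff_eq]
      rw [pvLowerChar_eq c 'O' 'o' (by decide) (by decide) (by decide),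
        pvLowerChar_eq d 'F' 'f' (by decide) (by decide) (by decide),
        pvLowerChar_eq e 'F' 'f' (by decide) (by decide) (by decide)]

-- A consumes a run of digits by pure accumulation, regardless of what follows
theorem pvA_digits (ds : List Char) : ∀ (cs : List Char) (soma num : Int) (ativ : Bool)
    (res : List String), (∀ d ∈ ds, PySem.Chars.isdigit d = true) →
    pvA_loop (ds ++ cs) soma num ativ res
      = pvA_loop cs soma (ds.foldl (fun a d => a * 10 + ((d.toNat : Int) - 48)) num) ativ res := by
  induction ds with
  | nil => intro cs soma num ativ res _; simp
  | cons d ds ih =>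
    intro cs soma num ativ res h
    have hd : PySem.Chars.isdigit d = true := h d (List.mem_cons_self)
    rw [List.cons_append]
    rw [pvA_loop]
    rw [if_pos hd, List.foldl_cons]
    exact ih cs soma _ ativ res (fun x hx => h x (List.mem_cons_of_mem d hx))

-- when the next character is not a digit (or the text ends), flushing the pending number
-- into soma first does not change the result
theorem pvA_flush (cs : List Char) (h : ∀ x ∈ cs.head?, PySem.Chars.isdigit x = false)
    (soma num : Int) (ativ : Bool) (res : List String) :
    pvA_loop cs soma num ativ res
      = pvA_loop cs (soma + (if ativ then num else 0)) 0 ativ res := by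
  cases cs with
  | nil => simp [pvA_loop]
  | cons c rest =>
    have hc : PySem.Chars.isdigit c = false := h c (by simp)
    rw [pvA_loop, pvA_loop]
    simp only [hc, Bool.false_eq_true, if_false, ite_self, add_zero]

theorem pvMain : ∀ (n : Nat) (cs : List Char), cs.length ≤ n →
    ∀ (soma : Int) (ativ : Bool) (res : List String),
    pvA_loop cs soma 0 ativ res = pvB_run (pvTokens cs) soma ativ res := by
  intro n
  induction n with
  | zero =>
    intro cs hlen soma ativ res
    have : cs = [] := List.length_eq_zero_iff.mp (Nat.le_zero.mp hlen)
    subst this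
    simp [pvA_loop, pvTokens, pvB_run]
  | succ n ih =>
    intro cs hlen soma ativ res
    cases cs with
    | nil => simp [pvA_loop, pvTokens, pvB_run]
    | cons c rest =>
      by_cases hd : PySem.Chars.isdigit c = true
      · -- a maximal digit run, then the rest
        have hsplit := List.takeWhile_append_dropWhile
          (p := PySem.Chars.isdigit) (l := c :: rest)
        have hall : ∀ d ∈ (c :: rest).takeWhile PySem.Chars.isdigit,
            PySem.Chars.isdigit d = true := fun d hdm => List.mem_takeWhile_imp hdm
        have hhead : ∀ x ∈ ((c :: rest).dropWhile PySem.Chars.isdigit).head?,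
            PySem.Chars.isdigit x = false := by
          intro x hx
          have hnp := List.head?_dropWhile_not PySem.Chars.isdigit (c :: rest)
          cases hrsc : (c :: rest).dropWhile PySem.Chars.isdigit with
          | nil => rw [hrsc] at hx; simp at hx
          | cons y t =>
            rw [hrsc] at hx hnp
            simp at hx hnp
            exact hx ▸ hnp
        have hlen2 : ((c :: rest).dropWhile PySem.Chars.isdigit).length ≤ n := by
          rw [List.dropWhile_cons_of_pos hd]
          have := List.length_dropWhile_le PySem.Chars.isdigit rest
          simp at hlen; omega
        calc pvA_loop (c :: rest) soma 0 ativ res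
            = pvA_loop ((c :: rest).takeWhile PySem.Chars.isdigit
                ++ (c :: rest).dropWhile PySem.Chars.isdigit) soma 0 ativ res := by
              rw [hsplit]
          _ = pvA_loop ((c :: rest).dropWhile PySem.Chars.isdigit) soma
                (((c :: rest).takeWhile PySem.Chars.isdigit).foldl
                  (fun a d => a * 10 + ((d.toNat : Int) - 48)) 0) ativ res :=
              pvA_digits _ _ _ _ _ _ hall
          _ = pvA_loop ((c :: rest).dropWhile PySem.Chars.isdigit)
                (soma + (if ativ then _ else 0)) 0 ativ res := pvA_flush _ hhead _ _ _ _
          _ = pvB_run (pvTokens ((c :: rest).dropWhile PySem.Chars.isdigit))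
                (soma + (if ativ then _ else 0)) ativ res := ih _ hlen2 _ _ _
          _ = pvB_run (pvTokens (c :: rest)) soma ativ res := by
              rw [pvTokens]
              rw [dif_pos hd, pvB_run]
              congr 1
              split_ifs <;> simp
      · have hd' : PySem.Chars.isdigit c = false := by simpa using hd
        have hlen1 : rest.length ≤ n := by simp at hlen; omega
        rw [pvA_loop, pvTokens]
        rw [if_neg (by simp [hd']), dif_neg (by simp [hd'])]
        simp only [ite_self, add_zero]
        by_cases heq : c = '='
        · rw [if_pos heq, if_pos heq, pvB_run]
          exact ih rest hlen1 _ _ _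
        · rw [if_neg heq, if_neg heq]
          by_cases hon : pvIsOn c rest = true
          · rw [if_pos ((pvLower_on_iff c rest).mpr hon),
              if_pos (show pvIsOn c rest = true from hon), pvB_run]
            exact ih (rest.drop 1) (by simp at hlen ⊢; omega) _ _ _
          · have hon' : pvIsOn c rest = false := by simpa using hon
            rw [if_neg (fun hcontra => hon ((pvLower_on_iff c rest).mp hcontra)),
              if_neg (show ¬ pvIsOn c rest = true by simp [hon'])]
            by_cases hoff : pvIsOff c rest = true
            · rw [if_pos ((pvLower_off_iff c rest).mpr hoff),
                if_pos (show pvIsOff c rest = true from hoff), pvB_run]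
              exact ih (rest.drop 2) (by simp at hlen ⊢; omega) _ _ _
            · have hoff' : pvIsOff c rest = false := by simpa using hoff
              rw [if_neg (fun hcontra => hoff ((pvLower_off_iff c rest).mp hcontra)),
                if_neg (show ¬ pvIsOff c rest = true by simp [hoff'])]
              exact ih rest hlen1 _ _ _

-- ===== VERDICT (by name: the statement is the Claim_ definition above) =====
theorem processar_texto_spec : Claim_equal_processar_texto := by
  intro texto _
  unfold Spec_processar_texto processar_texto processar_texto_alt
  exact congrArg (PySem.Str.join " ")
    (pvMain texto.toList.length texto.toList le_rfl 0 true [])
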